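-- pv_equiv track=rewrite | github.com/royadityak94/InterviewPrep | Grokking/DP/pattern_3/minimum_jumps_with_fee.py | find_min_fee_btmup
-- ===== SOURCE A (Python) =====
-- def find_min_fee_btmup(fee):
--     # Time: O(N), Space: O(N)
--     N = len(fee)
--     dp = [0 for _ in range(N+1)]
--     dp[:3] = [0, fee[0], fee[0]]
--
--     for idx in range(2, N):
--         dp[idx+1] = min(dp[idx]+fee[idx],
--                         dp[idx-1]+fee[idx-1],
--                         dp[idx-2]+fee[idx-2])
--     return dp[N]
-- ===== SOURCE B (Python) =====
-- def find_min_fee_btmup(fee):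
--     # Demand-driven top-down memoization with an explicit work-stack:
--     # start from the target index N and resolve an index once its three
--     # predecessors are memoized (no forward array fill, no recursion).
--     N = len(fee)
--     memo = {0: 0, 1: fee[0], 2: fee[0]}
--     stack = [N]
--     while stack:
--         j = stack[-1]
--         if j in memo:
--             stack.pop()
--             continue
--         missing = [d for d in (j - 1, j - 2, j - 3) if d not in memo]
--         if missing:
--             stack.extend(missing)
--         else:
--             memo[j] = min(memo[j - 1] + fee[j - 1],
--                           memo[j - 2] + fee[j - 2],
--                           memo[j - 3] + fee[j - 3])
--             stack.pop()
--     return memo[N]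
-- ===== Notes on version B (the rewrite author's own statement) =====
-- stated objective: alternative
-- what changed: Replaces A's forward dp-array fill with demand-driven top-down memoization: an explicit work-stack of pending indices starting from the target N and a dict memo, each index resolved only once its three predecessors are memoized.
import Mathlib
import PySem

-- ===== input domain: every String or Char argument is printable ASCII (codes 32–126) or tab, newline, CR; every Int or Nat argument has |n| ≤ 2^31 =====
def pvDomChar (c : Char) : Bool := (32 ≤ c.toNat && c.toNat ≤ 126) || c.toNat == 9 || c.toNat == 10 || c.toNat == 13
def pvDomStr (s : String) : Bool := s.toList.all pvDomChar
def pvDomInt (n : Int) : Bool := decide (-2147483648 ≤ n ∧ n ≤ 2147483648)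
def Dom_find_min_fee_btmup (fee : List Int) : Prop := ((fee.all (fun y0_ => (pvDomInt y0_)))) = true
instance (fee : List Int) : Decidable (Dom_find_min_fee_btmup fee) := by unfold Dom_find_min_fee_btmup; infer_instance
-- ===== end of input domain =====

-- B replaces A's forward dp-array fill with demand-driven top-down memoization: an explicit
-- work-stack of pending indices starting from the target N and a dict memo, each index
-- resolved only once its three predecessors are memoized (objective: alternative).

-- ===== PORT A =====
def find_min_fee_btmup (fee : List Int) : Int :=
  let N : Int := (fee.length : Int)
  -- dp: a zero for each position 0..N
  let dp0 : List Int := (PySem.List.pyRange 0 (N + 1) 1).map (fun _ => (0 : Int))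
  -- the first-element read raises IndexError on empty fee (excluded by Pre_); in-range reads/writes via pyGetD/pySetD are exact
  let f0 : Int := (PySem.List.pyGet? fee 0).getD 0
  -- Python slice assignment of the three base entries: replaces the first three, extending the list if shorter
  let dp1 : List Int := [0, f0, f0] ++ dp0.drop 3
  let dp := (PySem.List.pyRange 2 N 1).foldl (fun dp idx =>
      PySem.List.pySetD dp (idx + 1)
        (min (PySem.List.pyGetD dp idx 0 + PySem.List.pyGetD fee idx 0)
          (min (PySem.List.pyGetD dp (idx - 1) 0 + PySem.List.pyGetD fee (idx - 1) 0)
               (PySem.List.pyGetD dp (idx - 2) 0 + PySem.List.pyGetD fee (idx - 2) 0)))) dp1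
  PySem.List.pyGetD dp N 0

-- ===== PORT B =====
-- the while loop of Source B; the Python list used as a stack (append/extend/pop at the END) is
-- modelled with the TOP AT THE HEAD, so stack[-1] = head, pop = tail, and
-- stack.extend(missing) = missing.reverse ++ rest.  fuel only makes the loop total; the loop
-- itself exits when the stack empties, and the chosen fuel is proved sufficient below.
def bLoop (fee : List Int) : Nat → PySem.Dict Int Int → List Int → PySem.Dict Int Int
  | 0, memo, _ => memo
  | _ + 1, memo, [] => memo
  | fuel + 1, memo, j :: rest =>
      if memo.contains j then bLoop fee fuel memo rest      -- if j in memo: stack.pop(); continue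
      else
        let missing := [j - 1, j - 2, j - 3].filter (fun d => !(memo.contains d))
        if missing.isEmpty = false then
          bLoop fee fuel memo (missing.reverse ++ j :: rest)  -- stack.extend(missing)
        else
          -- memo[j] = min(memo[j-1]+fee[j-1], memo[j-2]+fee[j-2], memo[j-3]+fee[j-3]); stack.pop()
          -- (the guard guarantees the three memo keys are present and the fee indices in range,
          --  so getD/pyGetD read the same values the Python reads)
          bLoop fee fuel
            (memo.insert j (min (min (memo.getD (j - 1) 0 + PySem.List.pyGetD fee (j - 1) 0)
                                     (memo.getD (j - 2) 0 + PySem.List.pyGetD fee (j - 2) 0))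
                                (memo.getD (j - 3) 0 + PySem.List.pyGetD fee (j - 3) 0))) rest

def find_min_fee_btmup_alt (fee : List Int) : Int :=
  let N : Int := (fee.length : Int)
  let f0 : Int := (PySem.List.pyGet? fee 0).getD 0    -- the first-element read: IndexError on empty fee (excluded by Pre_)
  let memo0 := PySem.Dict.ofList [((0 : Int), (0 : Int)), (1, f0), (2, f0)]
  let memo := bLoop fee (6 * 5 ^ (fee.length + 1) + 8) memo0 [N]
  memo.getD N 0                                        -- memo[N]: the key is present once the stack is empty

-- ===== PRECONDITION & SPEC =====
-- Pre_ excludes exactly the empty list, on which Python A (and B) raises IndexError reading the first element.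
def Pre_find_min_fee_btmup (fee : List Int) : Prop := fee ≠ []
instance (fee : List Int) : Decidable (Pre_find_min_fee_btmup fee) := by unfold Pre_find_min_fee_btmup; infer_instance
def pvWitness_find_min_fee_btmup : List Int := [3, 7, 2, 5]

def Spec_find_min_fee_btmup (fee : List Int) (out : Int) : Prop := out = find_min_fee_btmup_alt fee
instance (fee : List Int) (out : Int) : Decidable (Spec_find_min_fee_btmup fee out) := by unfold Spec_find_min_fee_btmup; infer_instance

-- ===== CLAIM (what is proved, stated in full; the proofs are below) =====
def Claim_equal_find_min_fee_btmup : Prop := ∀ (fee : List Int), Dom_find_min_fee_btmup fee → Pre_find_min_fee_btmup fee → Spec_find_min_fee_btmup fee (find_min_fee_btmup fee)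

-- ===== LEMMAS AND PROOFS =====

-- the common recurrence both programs compute: dpF i = min fee paid to reach position i
def dpF (f : Nat → Int) : Nat → Int
  | 0 => 0
  | 1 => f 0
  | 2 => f 0
  | (j+3) => min (dpF f (j+2) + f (j+2)) (min (dpF f (j+1) + f (j+1)) (dpF f j + f j))

def fF (fee : List Int) (i : Nat) : Int := fee.getD i 0

-- ======== A-side proof (forward array fill computes dpF) ========

-- model of A's dp list after the iterations up to index m have run
def Dlist (fee : List Int) (m : Nat) : List Int :=
  (List.range (fee.length + 1)).map (fun i => if i ≤ m then dpF (fF fee) i else 0)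

theorem Dlist_length (fee : List Int) (m : Nat) : (Dlist fee m).length = fee.length + 1 := by
  simp [Dlist]

theorem Dlist_getD (fee : List Int) (m i : Nat) (hi : i < fee.length + 1) :
    (Dlist fee m).getD i 0 = if i ≤ m then dpF (fF fee) i else 0 := by
  rw [List.getD_eq_getElem _ _ (by simpa [Dlist_length] using hi)]
  simp [Dlist]

theorem Dlist_set (fee : List Int) (m : Nat) (_hm : m + 1 < fee.length + 1) :
    (Dlist fee m).set (m+1) (dpF (fF fee) (m+1)) = Dlist fee (m+1) := by
  apply List.ext_getElem
  · simp [Dlist]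
  · intro i h1 h2
    simp only [Dlist, List.getElem_set, List.getElem_map, List.getElem_range]
    rcases eq_or_ne i (m+1) with hi | hi
    · subst hi; simp
    · rw [if_neg (by omega : ¬ (m + 1 = i))]
      split_ifs with ha hb hb <;> first | rfl | omega

theorem A_loop (fee : List Int) (k : Nat) (hk : 2 + k ≤ fee.length) :
    (PySem.List.pyRange 2 (2 + (k : Int)) 1).foldl (fun dp idx =>
      PySem.List.pySetD dp (idx + 1)
        (min (PySem.List.pyGetD dp idx 0 + PySem.List.pyGetD fee idx 0)
          (min (PySem.List.pyGetD dp (idx - 1) 0 + PySem.List.pyGetD fee (idx - 1) 0)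
               (PySem.List.pyGetD dp (idx - 2) 0 + PySem.List.pyGetD fee (idx - 2) 0)))) (Dlist fee 2)
      = Dlist fee (2 + k) := by
  induction k with
  | zero => simp [PySem.List.pyRange_one_eq_nil]
  | succ k ih =>
    rw [Nat.cast_add, Nat.cast_one,
        show (2 : Int) + ((k : Int) + 1) = (2 + (k : Int)) + 1 from by ring,
        PySem.List.pyRange_one_succ_right (by omega), List.foldl_append,
        ih (by omega)]
    simp only [List.foldl_cons, List.foldl_nil]
    have c3 : (2 : Int) + (k : Int) + 1 = ((k + 3 : Nat) : Int) := by push_cast; ring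
    have c1 : (2 : Int) + (k : Int) - 1 = ((k + 1 : Nat) : Int) := by push_cast; ring
    have c2 : (2 : Int) + (k : Int) - 2 = ((k : Nat) : Int) := by ring
    have c0 : (2 : Int) + (k : Int) = ((k + 2 : Nat) : Int) := by push_cast; ring
    rw [c3, c1, c2, c0]
    simp only [PySem.List.pySetD_natCast, PySem.List.pyGetD_natCast]
    rw [Dlist_getD fee (2+k) (k+2) (by omega), Dlist_getD fee (2+k) (k+1) (by omega),
        Dlist_getD fee (2+k) k (by omega),
        if_pos (by omega : k+2 ≤ 2+k), if_pos (by omega : k+1 ≤ 2+k), if_pos (by omega : k ≤ 2+k)]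
    have hv : min (dpF (fF fee) (k+2) + fee.getD (k+2) 0)
        (min (dpF (fF fee) (k+1) + fee.getD (k+1) 0) (dpF (fF fee) k + fee.getD k 0))
        = dpF (fF fee) (k+3) := rfl
    rw [hv, show k + 3 = (2 + k) + 1 from by omega,
        Dlist_set fee (2+k) (by omega), show (2 + k) + 1 = 2 + (k + 1) from by omega]

theorem A_eq (fee : List Int) (h : fee ≠ []) :
    find_min_fee_btmup fee = dpF (fF fee) fee.length := by
  match fee, h with
  | [a], _ =>
    simp [find_min_fee_btmup, dpF, fF,
      PySem.List.pyRange_one_eq_nil (by norm_num : (1:Int) ≤ 2),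
      PySem.List.pyGetD_ofNat' _ 1]
  | [a, b], _ =>
    simp [find_min_fee_btmup, dpF, fF,
      PySem.List.pyRange_one_eq_nil (by norm_num : (2:Int) ≤ 2),
      PySem.List.pyGetD_ofNat' _ 2]
  | a :: b :: c :: r, _ =>
    set fee := a :: b :: c :: r with hfee
    have hN : 3 ≤ fee.length := by simp [hfee]
    simp only [find_min_fee_btmup]
    have hdp1 : [0, (PySem.List.pyGet? fee 0).getD 0, (PySem.List.pyGet? fee 0).getD 0]
        ++ ((PySem.List.pyRange 0 ((fee.length : Int) + 1) 1).map (fun _ => (0:Int))).drop 3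
        = Dlist fee 2 := by
      rw [show ((fee.length : Int) + 1) = ((fee.length + 1 : Nat) : Int) from by push_cast; ring,
          PySem.List.pyRange_zero_natCast, List.map_map]
      rw [show ((fun _ => (0:Int)) ∘ fun (k : Nat) => (k : Int)) = (fun _ => (0:Int)) from rfl,
          List.map_const', List.drop_replicate]
      rw [hfee, PySem.List.pyGet?_zero_cons]
      apply List.ext_getElem
      · simp [Dlist]
      · intro i h1 h2
        simp only [Dlist, List.getElem_map, List.getElem_range]
        match i with
        | 0 => rfl
        | 1 => rfl
        | 2 => rfl
        | (j+3) =>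
          rw [List.getElem_append_right (by simp), if_neg (by omega)]
          simp
    rw [hdp1, show (fee.length : Int) = 2 + ((fee.length - 2 : Nat) : Int) from by omega,
        A_loop fee (fee.length - 2) (by omega),
        show 2 + (fee.length - 2) = fee.length from by omega,
        show (2 : Int) + ((fee.length - 2 : Nat) : Int) = ((fee.length : Nat) : Int) from by omega,
        PySem.List.pyGetD_natCast, Dlist_getD fee fee.length fee.length (by omega), if_pos (by omega)]

-- ======== B-side proof (the stack machine computes dpF) ========

-- the memo dict after positions 0..m have been resolved, in the insertion order the machine produces
def memoUpTo (fee : List Int) : Nat → PySem.Dict Int Int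
  | 0 => PySem.Dict.ofList [((0 : Int), (0 : Int))]
  | m + 1 => (memoUpTo fee m).insert ((m : Int) + 1) (dpF (fF fee) (m + 1))

theorem memoUpTo_contains (fee : List Int) (m : Nat) (x : Int) :
    (memoUpTo fee m).contains x = decide (0 ≤ x ∧ x ≤ (m : Int)) := by
  induction m with
  | zero =>
    show (PySem.Dict.mk [((0 : Int), (0 : Int))]).contains x = _
    rw [Bool.eq_iff_iff]
    simp only [PySem.Dict.contains_mk, List.any_cons, List.any_nil, Bool.or_false,
      beq_iff_eq, decide_eq_true_eq]
    omega
  | succ m ih =>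
    rw [memoUpTo, PySem.Dict.contains_insert, ih, Bool.eq_iff_iff]
    simp only [Bool.or_eq_true, beq_iff_eq, decide_eq_true_eq]
    push_cast
    omega

theorem memoUpTo_contains_true (fee : List Int) (m : Nat) (x : Int)
    (h : 0 ≤ x ∧ x ≤ (m : Int)) : (memoUpTo fee m).contains x = true := by
  rw [memoUpTo_contains]; exact decide_eq_true h

theorem memoUpTo_contains_false (fee : List Int) (m : Nat) (x : Int)
    (h : ¬ (0 ≤ x ∧ x ≤ (m : Int))) : (memoUpTo fee m).contains x = false := by
  rw [memoUpTo_contains]; exact decide_eq_false h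

theorem memoUpTo_getD (fee : List Int) (m i : Nat) (h : i ≤ m) :
    (memoUpTo fee m).getD (i : Int) 0 = dpF (fF fee) i := by
  induction m with
  | zero =>
    have hi : i = 0 := by omega
    subst hi
    rfl
  | succ m ih =>
    rw [memoUpTo, PySem.Dict.getD_insert]
    by_cases hi : i = m + 1
    · subst hi
      rw [if_pos (by omega)]
    · rw [if_neg (by omega), ih (by omega)]

theorem bLoop_pop (fee : List Int) (fuel : Nat) (memo : PySem.Dict Int Int)
    (x : Int) (rest : List Int) (h : memo.contains x = true) :
    bLoop fee (fuel + 1) memo (x :: rest) = bLoop fee fuel memo rest := by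
  simp [bLoop, h]

-- one step of the machine when the top's three predecessors are memoized: resolve the top
theorem bLoop_memoize (fee : List Int) (fuel : Nat) (memo : PySem.Dict Int Int)
    (x : Int) (rest : List Int) (hc : memo.contains x = false)
    (h1 : memo.contains (x - 1) = true) (h2 : memo.contains (x - 2) = true)
    (h3 : memo.contains (x - 3) = true) :
    bLoop fee (fuel + 1) memo (x :: rest)
      = bLoop fee fuel
          (memo.insert x (min (min (memo.getD (x - 1) 0 + PySem.List.pyGetD fee (x - 1) 0)
                                   (memo.getD (x - 2) 0 + PySem.List.pyGetD fee (x - 2) 0))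
                              (memo.getD (x - 3) 0 + PySem.List.pyGetD fee (x - 3) 0))) rest := by
  simp only [bLoop, hc, Bool.false_eq_true, if_false]
  have hfil : [x - 1, x - 2, x - 3].filter (fun d => !(memo.contains d)) = [] := by
    simp [List.filter, h1, h2, h3]
  rw [hfil]
  simp

-- resolving position m+1 on top of the downward-closed memo {0..m} yields {0..m+1}
theorem bLoop_step_memo (fee : List Int) (fuel : Nat) (m : Nat) (hm : 2 ≤ m) (rest : List Int) :
    bLoop fee (fuel + 1) (memoUpTo fee m) (((m : Int) + 1) :: rest)
      = bLoop fee fuel (memoUpTo fee (m + 1)) rest := by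
  rw [bLoop_memoize fee fuel _ _ rest
      (memoUpTo_contains_false fee m _ (by omega))
      (memoUpTo_contains_true fee m _ (by omega))
      (memoUpTo_contains_true fee m _ (by omega))
      (memoUpTo_contains_true fee m _ (by omega))]
  congr 1
  have e1 : (m : Int) + 1 - 1 = ((m : Nat) : Int) := by omega
  have e2 : (m : Int) + 1 - 2 = ((m - 1 : Nat) : Int) := by omega
  have e3 : (m : Int) + 1 - 3 = ((m - 2 : Nat) : Int) := by omega
  rw [e1, e2, e3, PySem.List.pyGetD_natCast, PySem.List.pyGetD_natCast, PySem.List.pyGetD_natCast,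
      memoUpTo_getD fee m m le_rfl, memoUpTo_getD fee m (m - 1) (by omega),
      memoUpTo_getD fee m (m - 2) (by omega)]
  rw [memoUpTo]
  congr 1
  have hm1 : m + 1 = (m - 2) + 3 := by omega
  rw [hm1]
  show _ = min (dpF (fF fee) (m - 2 + 2) + fF fee (m - 2 + 2))
      (min (dpF (fF fee) (m - 2 + 1) + fF fee (m - 2 + 1)) (dpF (fF fee) (m - 2) + fF fee (m - 2)))
  have g2 : m - 2 + 2 = m := by omega
  have g1 : m - 2 + 1 = m - 1 := by omega
  rw [g2, g1, min_assoc]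
  rfl

-- one step of the machine when the top x is unresolved and some predecessor is missing: push
theorem bLoop_push (fee : List Int) (fuel : Nat) (memo : PySem.Dict Int Int)
    (x : Int) (rest miss : List Int) (hc : memo.contains x = false)
    (hfil : [x - 1, x - 2, x - 3].filter (fun d => !(memo.contains d)) = miss)
    (hne : miss.isEmpty = false) :
    bLoop fee (fuel + 1) memo (x :: rest) = bLoop fee fuel memo (miss.reverse ++ x :: rest) := by
  simp only [bLoop, hc, Bool.false_eq_true, if_false, hfil, hne]
  simp

-- the machine started -- the machine started -- the machine started on a downward-closed memo {0..m} and a stack j :: rest clears j,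
-- leaving memo {0..max m j}, within 6·5^k steps when j ≤ m + k
theorem bClear (fee : List Int) (k : Nat) :
    ∀ (m j : Nat) (rest : List Int) (fuel : Nat), 2 ≤ m → j ≤ m + k → 6 * 5 ^ k ≤ fuel →
      ∃ f', bLoop fee fuel (memoUpTo fee m) ((j : Int) :: rest)
              = bLoop fee f' (memoUpTo fee (max m j)) rest ∧ fuel ≤ f' + 6 * 5 ^ k := by
  induction k with
  | zero =>
    intro m j rest fuel hm hj hfuel
    obtain ⟨f, rfl⟩ : ∃ f, fuel = f + 1 := ⟨fuel - 1, by omega⟩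
    rw [bLoop_pop fee f _ _ rest (memoUpTo_contains_true fee m _ (by omega))]
    exact ⟨f, by rw [Nat.max_eq_left (by omega)], by omega⟩
  | succ k ih =>
    intro m j rest fuel hm hj hfuel
    have h5 : 6 * 5 ^ (k + 1) = 30 * 5 ^ k := by rw [pow_succ]; ring
    have hpos : 0 < 6 * 5 ^ (k + 1) := by positivity
    obtain ⟨f, rfl⟩ : ∃ f, fuel = f + 1 := ⟨fuel - 1, by omega⟩
    by_cases hjm : j ≤ m
    · rw [bLoop_pop fee f _ _ rest (memoUpTo_contains_true fee m _ (by omega))]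
      exact ⟨f, by rw [Nat.max_eq_left hjm], by omega⟩
    · by_cases hj1 : j = m + 1
      · subst hj1
        rw [show ((m + 1 : Nat) : Int) = (m : Int) + 1 from by push_cast; ring,
            bLoop_step_memo fee f m hm rest]
        exact ⟨f, by rw [Nat.max_eq_right (by omega)], by omega⟩
      · have hjm2 : m + 2 ≤ j := by omega
        have hk1 : 1 ≤ k := by omega
        have hc : (memoUpTo fee m).contains (j : Int) = false :=
          memoUpTo_contains_false fee m _ (by omega)
        have ha : (memoUpTo fee m).contains ((j : Int) - 1) = false :=
          memoUpTo_contains_false fee m _ (by omega)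
        by_cases hja : j = m + 2
        · -- missing = [j-1]
          have hb : (memoUpTo fee m).contains ((j : Int) - 2) = true :=
            memoUpTo_contains_true fee m _ (by omega)
          have hd : (memoUpTo fee m).contains ((j : Int) - 3) = true :=
            memoUpTo_contains_true fee m _ (by omega)
          rw [bLoop_push fee f _ _ rest [(j : Int) - 1] hc
                (by simp [List.filter, ha, hb, hd]) rfl]
          simp only [List.reverse_cons, List.reverse_nil, List.nil_append, List.cons_append]
          rw [show ((j : Int) - 1) = ((j - 1 : Nat) : Int) from by omega]
          obtain ⟨f1, e1, hf1⟩ := ih m (j - 1) ((j : Int) :: rest) f hm (by omega)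
            (by omega)
          rw [e1, Nat.max_eq_right (by omega : m ≤ j - 1)]
          obtain ⟨f2, e2, hf2⟩ := ih (j - 1) j rest f1 (by omega) (by omega) (by omega)
          rw [e2, Nat.max_eq_right (by omega : j - 1 ≤ j)]
          exact ⟨f2, by rw [Nat.max_eq_right (by omega : m ≤ j)], by omega⟩
        · by_cases hjb : j = m + 3
          · -- missing = [j-1, j-2]
            have hb : (memoUpTo fee m).contains ((j : Int) - 2) = false :=
              memoUpTo_contains_false fee m _ (by omega)
            have hd : (memoUpTo fee m).contains ((j : Int) - 3) = true :=
              memoUpTo_contains_true fee m _ (by omega)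
            rw [bLoop_push fee f _ _ rest [(j : Int) - 1, (j : Int) - 2] hc
                  (by simp [List.filter, ha, hb, hd]) rfl]
            simp only [List.reverse_cons, List.reverse_nil, List.nil_append, List.cons_append]
            rw [show ((j : Int) - 2) = ((j - 2 : Nat) : Int) from by omega,
                show ((j : Int) - 1) = ((j - 1 : Nat) : Int) from by omega]
            obtain ⟨f1, e1, hf1⟩ := ih m (j - 2) (((j - 1 : Nat) : Int) :: (j : Int) :: rest) f
              hm (by omega) (by omega)
            rw [e1, Nat.max_eq_right (by omega : m ≤ j - 2)]
            obtain ⟨f2, e2, hf2⟩ := ih (j - 2) (j - 1) ((j : Int) :: rest) f1 (by omega)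
              (by omega) (by omega)
            rw [e2, Nat.max_eq_right (by omega : j - 2 ≤ j - 1)]
            obtain ⟨f3, e3, hf3⟩ := ih (j - 1) j rest f2 (by omega) (by omega) (by omega)
            rw [e3, Nat.max_eq_right (by omega : j - 1 ≤ j)]
            exact ⟨f3, by rw [Nat.max_eq_right (by omega : m ≤ j)], by omega⟩
          · -- j ≥ m + 4: missing = [j-1, j-2, j-3]
            have hb : (memoUpTo fee m).contains ((j : Int) - 2) = false :=
              memoUpTo_contains_false fee m _ (by omega)
            have hd : (memoUpTo fee m).contains ((j : Int) - 3) = false :=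
              memoUpTo_contains_false fee m _ (by omega)
            rw [bLoop_push fee f _ _ rest [(j : Int) - 1, (j : Int) - 2, (j : Int) - 3] hc
                  (by simp [List.filter, ha, hb, hd]) rfl]
            simp only [List.reverse_cons, List.reverse_nil, List.nil_append, List.cons_append]
            rw [show ((j : Int) - 3) = ((j - 3 : Nat) : Int) from by omega,
                show ((j : Int) - 2) = ((j - 2 : Nat) : Int) from by omega,
                show ((j : Int) - 1) = ((j - 1 : Nat) : Int) from by omega]
            obtain ⟨f1, e1, hf1⟩ := ih m (j - 3)
              (((j - 2 : Nat) : Int) :: ((j - 1 : Nat) : Int) :: (j : Int) :: rest) f hm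
              (by omega) (by omega)
            rw [e1, Nat.max_eq_right (by omega : m ≤ j - 3)]
            obtain ⟨f2, e2, hf2⟩ := ih (j - 3) (j - 2) (((j - 1 : Nat) : Int) :: (j : Int) :: rest)
              f1 (by omega) (by omega) (by omega)
            rw [e2, Nat.max_eq_right (by omega : j - 3 ≤ j - 2)]
            obtain ⟨f3, e3, hf3⟩ := ih (j - 2) (j - 1) ((j : Int) :: rest) f2 (by omega)
              (by omega) (by omega)
            rw [e3, Nat.max_eq_right (by omega : j - 2 ≤ j - 1)]
            obtain ⟨f4, e4, hf4⟩ := ih (j - 1) j rest f3 (by omega) (by omega) (by omega)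
            rw [e4, Nat.max_eq_right (by omega : j - 1 ≤ j)]
            exact ⟨f4, by rw [Nat.max_eq_right (by omega : m ≤ j)], by omega⟩

theorem bLoop_nil (fee : List Int) (fuel : Nat) (memo : PySem.Dict Int Int) :
    bLoop fee fuel memo [] = memo := by
  cases fuel <;> rfl

theorem B_eq (fee : List Int) (h : fee ≠ []) :
    find_min_fee_btmup_alt fee = dpF (fF fee) fee.length := by
  obtain ⟨a, t, rfl⟩ : ∃ a t, fee = a :: t := by
    cases fee with
    | nil => exact absurd rfl h
    | cons a t => exact ⟨a, t, rfl⟩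
  have hm0 : PySem.Dict.ofList [((0 : Int), (0 : Int)),
      (1, (PySem.List.pyGet? (a :: t) 0).getD 0), (2, (PySem.List.pyGet? (a :: t) 0).getD 0)]
      = memoUpTo (a :: t) 2 := by
    rw [PySem.List.pyGet?_zero_cons]
    rfl
  have hfuel : 6 * 5 ^ (a :: t).length ≤ 6 * 5 ^ ((a :: t).length + 1) + 8 := by
    have := Nat.pow_le_pow_right (show 1 ≤ 5 by norm_num) (Nat.le_succ (a :: t).length)
    omega
  obtain ⟨f', e, _⟩ := bClear (a :: t) (a :: t).length 2 (a :: t).length []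
    (6 * 5 ^ ((a :: t).length + 1) + 8) le_rfl (by omega) hfuel
  simp only [find_min_fee_btmup_alt]
  rw [hm0, e, bLoop_nil,
      memoUpTo_getD (a :: t) (max 2 (a :: t).length) (a :: t).length (le_max_right _ _)]
-- ===== VERDICT (by name: the statement is the Claim_ definition above) =====
theorem find_min_fee_btmup_spec : Claim_equal_find_min_fee_btmup := by
  intro fee _ hpre
  unfold Spec_find_min_fee_btmup
  rw [A_eq fee hpre, B_eq fee hpre]
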